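-- pv_equiv track=rewrite | github.com/BatsResearch/wiser | wiser/eval/util.py | _score_sequence_token_level
-- ===== SOURCE A (Python) =====
-- def _score_sequence_token_level(predicted_labels, gold_labels):
--     if len(predicted_labels) != len(gold_labels):
--         raise ValueError("Lengths of predicted_labels and gold_labels must match")
--
--     tp, fp, fn = 0, 0, 0
--     for i in range(len(predicted_labels)):
--         prediction = predicted_labels[i]
--         gold = gold_labels[i]
--
--         if gold[0] == 'I' or gold[0] == 'B':
--             if prediction == gold:
--                 tp += 1
--             elif prediction[0] == 'I' or prediction[0] == 'B':
--                 fp += 1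
--                 fn += 1
--             else:
--                 fn += 1
--         elif prediction[0] == 'I' or prediction[0] == 'B':
--             fp += 1
--
--     return tp, fp, fn
-- ===== SOURCE B (Python) =====
-- def _score_sequence_token_level(predicted_labels, gold_labels):
--     if len(predicted_labels) != len(gold_labels):
--         raise ValueError("Lengths of predicted_labels and gold_labels must match")
--
--     pairs = list(zip(predicted_labels, gold_labels))
--     tp = sum(1 for p, g in pairs if g[0] in 'IB' and p == g)
--     fn = sum(1 for p, g in pairs if g[0] in 'IB' and p != g)
--     fp = sum(1 for p, g in pairs if p[0] in 'IB' and not (g[0] in 'IB' and p == g))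
--     return tp, fp, fn
-- ===== Notes on version B (the rewrite author's own statement) =====
-- stated objective: alternative
-- what changed: Replaces A's single stateful loop with nested branches by three independent predicate-based counts (gold-entity&match, gold-entity&mismatch, pred-entity&not-true-positive) aggregated over zip(predicted_labels, gold_labels).
import Mathlib
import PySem

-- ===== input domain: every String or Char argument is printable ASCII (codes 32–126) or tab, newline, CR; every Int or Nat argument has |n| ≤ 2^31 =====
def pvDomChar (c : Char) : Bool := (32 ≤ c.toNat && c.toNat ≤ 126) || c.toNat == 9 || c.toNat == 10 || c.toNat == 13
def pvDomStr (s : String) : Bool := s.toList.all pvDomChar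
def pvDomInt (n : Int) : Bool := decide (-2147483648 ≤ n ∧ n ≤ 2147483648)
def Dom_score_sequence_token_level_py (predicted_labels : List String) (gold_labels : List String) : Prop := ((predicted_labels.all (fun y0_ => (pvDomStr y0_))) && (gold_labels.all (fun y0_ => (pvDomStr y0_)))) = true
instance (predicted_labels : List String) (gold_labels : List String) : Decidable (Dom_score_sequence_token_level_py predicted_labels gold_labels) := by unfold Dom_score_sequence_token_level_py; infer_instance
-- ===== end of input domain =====

-- B replaces A's single branchy index loop by three independent predicate counts over zip (objective: alternative decomposition, same cost).

-- ===== PORT A =====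
-- step of A's loop body; label[0] read via pyGetD (in range under Pre_: labels nonempty)
def pvAStep (s : Int × Int × Int) (prediction gold : String) : Int × Int × Int :=
  let g0 := PySem.List.pyGetD gold.toList 0 ' '
  let p0 := PySem.List.pyGetD prediction.toList 0 ' '
  if g0 = 'I' ∨ g0 = 'B' then
    if prediction = gold then (s.1 + 1, s.2.1, s.2.2)
    else if p0 = 'I' ∨ p0 = 'B' then (s.1, s.2.1 + 1, s.2.2 + 1)
    else (s.1, s.2.1, s.2.2 + 1)
  else if p0 = 'I' ∨ p0 = 'B' then (s.1, s.2.1 + 1, s.2.2)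
  else s

def score_sequence_token_level_py (predicted_labels : List String) (gold_labels : List String) : Int × Int × Int :=
  if predicted_labels.length ≠ gold_labels.length then (0, 0, 0)  -- ValueError; excluded by Pre_
  else
    (PySem.List.pyRange 0 (predicted_labels.length : Int) 1).foldl
      (fun s i => pvAStep s (PySem.List.pyGetD predicted_labels i "") (PySem.List.pyGetD gold_labels i ""))
      (0, 0, 0)

-- ===== PORT B =====
-- x[0] in 'IB'
def pvEnt (s : String) : Bool := PySem.List.pyGetD s.toList 0 ' ' ∈ ['I', 'B']

def score_sequence_token_level_py_alt (predicted_labels : List String) (gold_labels : List String) : Int × Int × Int :=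
  if predicted_labels.length ≠ gold_labels.length then (0, 0, 0)  -- ValueError; excluded by Pre_
  else
    let pairs := predicted_labels.zip gold_labels
    let tp := (pairs.filter (fun pg => pvEnt pg.2 && pg.1 == pg.2)).length
    let fn := (pairs.filter (fun pg => pvEnt pg.2 && pg.1 != pg.2)).length
    let fp := (pairs.filter (fun pg => pvEnt pg.1 && !(pvEnt pg.2 && pg.1 == pg.2))).length
    ((tp : Int), (fp : Int), (fn : Int))

-- ===== PRECONDITION & SPEC =====
-- Pre_ is exactly where Python A returns: equal lengths (else ValueError) and no empty
-- label string (label[0] raises IndexError on "").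
def Pre_score_sequence_token_level_py (predicted_labels : List String) (gold_labels : List String) : Prop :=
  predicted_labels.length = gold_labels.length ∧
  (∀ s ∈ predicted_labels, s ≠ "") ∧ (∀ s ∈ gold_labels, s ≠ "")
instance (predicted_labels : List String) (gold_labels : List String) : Decidable (Pre_score_sequence_token_level_py predicted_labels gold_labels) := by unfold Pre_score_sequence_token_level_py; infer_instance

def pvWitness_score_sequence_token_level_py : List String × List String :=
  (["B-PER", "O", "I-PER"], ["B-PER", "I-PER", "O"])

def Spec_score_sequence_token_level_py (predicted_labels : List String) (gold_labels : List String) (out : Int × Int × Int) : Prop := out = score_sequence_token_level_py_alt predicted_labels gold_labels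
instance (predicted_labels : List String) (gold_labels : List String) (out : Int × Int × Int) : Decidable (Spec_score_sequence_token_level_py predicted_labels gold_labels out) := by unfold Spec_score_sequence_token_level_py; infer_instance

-- ===== CLAIM (what is proved, stated in full; the proofs are below) =====
def Claim_equal_score_sequence_token_level_py : Prop := ∀ (predicted_labels : List String) (gold_labels : List String), Dom_score_sequence_token_level_py predicted_labels gold_labels → Pre_score_sequence_token_level_py predicted_labels gold_labels → Spec_score_sequence_token_level_py predicted_labels gold_labels (score_sequence_token_level_py predicted_labels gold_labels)

-- ===== LEMMAS AND PROOFS =====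

-- the index list of A's loop, materialised as the zipped pairs B folds over
lemma pv_map_idx_eq_zip (p g : List String) (h : p.length = g.length) :
    (PySem.List.pyRange 0 (p.length : Int) 1).map
      (fun i => (PySem.List.pyGetD p i "", PySem.List.pyGetD g i "")) = p.zip g := by
  rw [PySem.List.pyRange_zero_nat]
  rw [List.map_map]
  induction p generalizing g with
  | nil => simp
  | cons a p ih =>
    cases g with
    | nil => simp at h
    | cons b g =>
      simp only [List.length_cons, List.range_succ_eq_map, List.map_cons, List.map_map,
        List.zip_cons_cons]
      refine List.cons_eq_cons.mpr ⟨by simp, ?_⟩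
      have := ih g (by simpa using h)
      rw [← this]
      apply List.map_congr_left
      intro k _
      simp [Function.comp]
      constructor <;> · rw [show ((k : Int) + 1) = ((k + 1 : Nat) : Int) by omega, PySem.List.pyGetD_natCast]
                        simp [List.getD]

-- fold of A's step over the pairs = the three counts B computes, with any accumulator
lemma pv_fold_eq_counts (L : List (String × String)) (tp fp fn : Int) :
    L.foldl (fun s pr => pvAStep s pr.1 pr.2) (tp, fp, fn) =
      (tp + ((L.filter (fun pg => pvEnt pg.2 && pg.1 == pg.2)).length : Int),
       fp + ((L.filter (fun pg => pvEnt pg.1 && !(pvEnt pg.2 && pg.1 == pg.2))).length : Int),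
       fn + ((L.filter (fun pg => pvEnt pg.2 && pg.1 != pg.2)).length : Int)) := by
  induction L generalizing tp fp fn with
  | nil => simp
  | cons x L ih =>
    have hent : ∀ s : String,
        (pvEnt s = true) ↔ (PySem.List.pyGetD s.toList 0 ' ' = 'I' ∨ PySem.List.pyGetD s.toList 0 ' ' = 'B') := by
      intro s; simp [pvEnt]
    simp only [List.foldl_cons, List.filter_cons]
    rw [ih]
    by_cases hg : PySem.List.pyGetD x.2.toList 0 ' ' = 'I' ∨ PySem.List.pyGetD x.2.toList 0 ' ' = 'B' <;>
      by_cases hpq : x.1 = x.2 <;>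
        by_cases hp : PySem.List.pyGetD x.1.toList 0 ' ' = 'I' ∨ PySem.List.pyGetD x.1.toList 0 ' ' = 'B' <;>
          simp [pvAStep, hg, hpq, hp, hent, Prod.ext_iff] <;> omega

-- ===== VERDICT (by name: the statement is the Claim_ definition above) =====
theorem score_sequence_token_level_py_spec : Claim_equal_score_sequence_token_level_py := by
  intro p g _ hpre
  obtain ⟨hlen, -, -⟩ := hpre
  unfold Spec_score_sequence_token_level_py score_sequence_token_level_py score_sequence_token_level_py_alt
  rw [if_neg (by simp [hlen]), if_neg (by simp [hlen])]
  have hmap := pv_map_idx_eq_zip p g hlen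
  calc (PySem.List.pyRange 0 (p.length : Int) 1).foldl
        (fun s i => pvAStep s (PySem.List.pyGetD p i "") (PySem.List.pyGetD g i "")) (0, 0, 0)
      = ((PySem.List.pyRange 0 (p.length : Int) 1).map
          (fun i => (PySem.List.pyGetD p i "", PySem.List.pyGetD g i ""))).foldl
          (fun s pr => pvAStep s pr.1 pr.2) (0, 0, 0) := by rw [List.foldl_map]
    _ = (p.zip g).foldl (fun s pr => pvAStep s pr.1 pr.2) (0, 0, 0) := by rw [hmap]
    _ = _ := by rw [pv_fold_eq_counts]; simp
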